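-- pv_equiv track=rewrite | github.com/NarciSource/Python-Coding-Study | programmers/명예의 전당 (1).py | solution
-- ===== SOURCE A (Python) =====
-- def solution(k, score):
--     from heapq import heappop, heappush
--     q, lowers = [], []
--     for s in score:
--         heappush(q,s)
--         if len(q)>k: heappop(q)
--         lowers.append(q[0])
--     return lowers
-- ===== SOURCE B (Python) =====
-- def solution(k, score):
--     top = []   # ascending sorted list of the (at most k) largest scores seen so far
--     res = []
--     for s in score:
--         lo, hi = 0, len(top)
--         while lo < hi:
--             mid = (lo + hi) // 2
--             if top[mid] < s:
--                 lo = mid + 1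
--             else:
--                 hi = mid
--         top.insert(lo, s)
--         if len(top) > k:
--             del top[0]
--         res.append(top[0])
--     return res
-- ===== Notes on version B (the rewrite author's own statement) =====
-- stated objective: simpler
-- what changed: Replaces the binary heap (heapq push/pop) by an ascending sorted list of the at-most-k largest scores: each score is inserted at its sorted position, the smallest element is dropped when the list exceeds k, and the front element is recorded.
import Mathlib
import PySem

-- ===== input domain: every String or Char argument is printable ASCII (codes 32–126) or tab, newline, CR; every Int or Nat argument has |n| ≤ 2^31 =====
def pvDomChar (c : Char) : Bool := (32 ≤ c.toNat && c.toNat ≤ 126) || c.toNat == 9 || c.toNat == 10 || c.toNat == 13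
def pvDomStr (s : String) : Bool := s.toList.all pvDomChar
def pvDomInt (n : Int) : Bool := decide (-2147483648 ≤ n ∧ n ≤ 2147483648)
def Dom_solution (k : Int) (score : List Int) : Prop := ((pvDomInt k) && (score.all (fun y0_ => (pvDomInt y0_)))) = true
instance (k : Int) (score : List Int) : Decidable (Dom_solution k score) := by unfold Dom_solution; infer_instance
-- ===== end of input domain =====

-- B replaces A's binary heap by an ascending sorted list of the top-k scores (simpler, no heap machinery); return-value equivalence only.


-- ===== PORT A =====
-- heapq is ported by its contract: the heap q is represented by the list of its elements
-- (heappush appends, heappop removes one occurrence of the minimum, q[0] reads the minimum).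
-- This is exact for the returned value, which depends only on the heap's multiset of elements.
def heappushA (q : List Int) (s : Int) : List Int := q ++ [s]

def heappopA (q : List Int) : List Int :=
  match q.min? with
  | none => []
  | some m => q.erase m

def stepA (k : Int) (st : List Int × List Int) (s : Int) : List Int × List Int :=
  let q := heappushA st.1 s
  let q := if k < (q.length : Int) then heappopA q else q
  (q, st.2 ++ [q.min?.getD 0])   -- q[0]; the default 0 is reached only where Python raises (outside Pre_)

def solution (k : Int) (score : List Int) : List Int :=
  (score.foldl (stepA k) ([], [])).2

-- ===== PORT B =====
-- the while-loop binary search for the insertion position (lo, hi are the loop variables)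
def bsearch (top : List Int) (s : Int) (lo hi : Nat) : Nat :=
  if h : lo < hi then
    let mid := (lo + hi) / 2   -- (lo + hi) // 2 on nonnegative values
    if top.getD mid 0 < s then bsearch top s (mid + 1) hi   -- top[mid] is in range whenever 0 ≤ mid < len(top)
    else bsearch top s lo mid
  else lo
termination_by hi - lo
decreasing_by all_goals omega

def stepB (k : Int) (st : List Int × List Int) (s : Int) : List Int × List Int :=
  let top := st.1.insertIdx (bsearch st.1 s 0 st.1.length) s   -- top.insert(lo, s); lo ≤ len(top), so insertIdx is exact
  let top := if k < (top.length : Int) then top.drop 1 else top   -- del top[0]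
  (top, st.2 ++ [top.headD 0])   -- top[0]; the default 0 is reached only where Python raises (outside Pre_)

def solution_alt (k : Int) (score : List Int) : List Int :=
  (score.foldl (stepB k) ([], [])).2

-- ===== PRECONDITION & SPEC =====
-- Pre_ excludes k ≤ 0 with a nonempty score, where both Pythons raise IndexError (q[0] / top[0] on an empty list).
def Pre_solution (k : Int) (score : List Int) : Prop := score = [] ∨ 1 ≤ k
instance (k : Int) (score : List Int) : Decidable (Pre_solution k score) := by unfold Pre_solution; infer_instance
def pvWitness_solution : Int × List Int := (2, [10, 100, 20, 150])

def Spec_solution (k : Int) (score : List Int) (out : List Int) : Prop := out = solution_alt k score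
instance (k : Int) (score : List Int) (out : List Int) : Decidable (Spec_solution k score out) := by unfold Spec_solution; infer_instance

-- ===== CLAIM (what is proved, stated in full; the proofs are below) =====
def Claim_equal_solution : Prop := ∀ (k : Int) (score : List Int), Dom_solution k score → Pre_solution k score → Spec_solution k score (solution k score)

-- ===== LEMMAS AND PROOFS =====

theorem min?_of_perm (l1 l2 : List Int) (h : l1.Perm l2) : l1.min? = l2.min? := by
  cases h1 : l1.min? with
  | none =>
    rw [List.min?_eq_none_iff] at h1
    subst h1
    rw [h.symm.eq_nil]
    rfl
  | some m =>
    rw [List.min?_eq_some_iff] at h1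
    obtain ⟨hm, hle⟩ := h1
    symm
    rw [List.min?_eq_some_iff]
    exact ⟨h.mem_iff.1 hm, fun b hb => hle b (h.mem_iff.2 hb)⟩

theorem min?_sorted_cons (h : Int) (t : List Int) (hs : (h :: t).Pairwise (· ≤ ·)) :
    (h :: t).min? = some h := by
  rw [List.min?_eq_some_iff]
  refine ⟨List.mem_cons_self, ?_⟩
  intro a ha
  rcases List.mem_cons.1 ha with rfl | ha
  · exact le_refl _
  · exact (List.pairwise_cons.1 hs).1 a ha

theorem getD_mono (top : List Int) (hs : top.Pairwise (· ≤ ·))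
    (i j : Nat) (hij : i ≤ j) (hj : j < top.length) :
    top.getD i 0 ≤ top.getD j 0 := by
  rcases Nat.lt_or_ge i j with hlt | hge
  · rw [List.getD_eq_getElem top 0 (by omega), List.getD_eq_getElem top 0 hj]
    exact List.pairwise_iff_getElem.1 hs i j (by omega) hj hlt
  · have : i = j := by omega
    subst this; exact le_refl _

/-- The binary search returns a split point: everything before it is < s, everything from it on is ≥ s. -/
theorem bsearch_spec (top : List Int) (s : Int) (hs : top.Pairwise (· ≤ ·)) :
    ∀ lo hi, lo ≤ hi → hi ≤ top.length →
    (∀ i, i < lo → top.getD i 0 < s) →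
    (∀ i, hi ≤ i → i < top.length → ¬ top.getD i 0 < s) →
    (bsearch top s lo hi ≤ top.length ∧
     (∀ i, i < bsearch top s lo hi → top.getD i 0 < s) ∧
     (∀ i, bsearch top s lo hi ≤ i → i < top.length → ¬ top.getD i 0 < s)) := by
  intro lo hi
  induction hlen : hi - lo using Nat.strong_induction_on generalizing lo hi with
  | _ n ih =>
    intro hlohi hhi hbelow habove
    rw [bsearch]
    by_cases h : lo < hi
    · simp only [dif_pos h]
      by_cases hmid : top.getD ((lo + hi) / 2) 0 < s
      · simp only [if_pos hmid]
        exact ih (hi - ((lo + hi) / 2 + 1)) (by omega) ((lo + hi) / 2 + 1) hi rfl (by omega) hhi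
          (fun i hi' => lt_of_le_of_lt (getD_mono top hs i ((lo + hi) / 2) (by omega) (by omega)) hmid)
          habove
      · simp only [if_neg hmid]
        exact ih ((lo + hi) / 2 - lo) (by omega) lo ((lo + hi) / 2) rfl (by omega) (by omega) hbelow
          (fun i hi' hi'' => fun hlt =>
            hmid (lt_of_le_of_lt (getD_mono top hs ((lo + hi) / 2) i hi' hi'') hlt))
    · simp only [dif_neg h]
      have : lo = hi := by omega
      subst this
      exact ⟨by omega, hbelow, habove⟩

/-- Inserting at any split point of a sorted list is the ordered insert. -/
theorem insertIdx_split (top : List Int) (s : Int) (r : Nat) (hr : r ≤ top.length)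
    (h1 : ∀ i, i < r → top.getD i 0 < s)
    (h2 : ∀ i, r ≤ i → i < top.length → ¬ top.getD i 0 < s) :
    top.insertIdx r s = top.orderedInsert (· ≤ ·) s := by
  induction top generalizing r with
  | nil =>
    have : r = 0 := by simpa using hr
    subst this; rfl
  | cons t ts ih =>
    cases r with
    | zero =>
      have := h2 0 (by omega) (by simp)
      simp only [List.getD_cons_zero, not_lt] at this
      simp [List.orderedInsert, this]
    | succ r' =>
      have ht : t < s := by simpa using h1 0 (by omega)
      simp only [List.insertIdx_succ_cons, List.orderedInsert, if_neg (not_le.mpr ht)]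
      rw [ih r' (by simpa using hr)
        (fun i hi => by simpa using h1 (i + 1) (by omega))
        (fun i hi hi' => by simpa using h2 (i + 1) (by omega) (by simpa using hi'))]

theorem insertIdx_bsearch (top : List Int) (s : Int) (hs : top.Pairwise (· ≤ ·)) :
    top.insertIdx (bsearch top s 0 top.length) s = top.orderedInsert (· ≤ ·) s := by
  obtain ⟨hr, h1, h2⟩ := bsearch_spec top s hs 0 top.length (by omega) (le_refl _)
    (by omega) (fun i hi hi' => by omega)
  exact insertIdx_split top s _ hr h1 h2

/-- One loop step: starting from permuted states (B's sorted), the new states are permuted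
(B's still sorted) and the recorded value is the same. -/
theorem step_rel (k s : Int) (q top acc : List Int)
    (hp : q.Perm top) (hs : top.Pairwise (· ≤ ·)) :
    (stepA k (q, acc) s).1.Perm (stepB k (top, acc) s).1 ∧
    (stepB k (top, acc) s).1.Pairwise (· ≤ ·) ∧
    (stepA k (q, acc) s).2 = (stepB k (top, acc) s).2 := by
  have hins : top.insertIdx (bsearch top s 0 top.length) s = top.orderedInsert (· ≤ ·) s :=
    insertIdx_bsearch top s hs
  have hperm1 : (q ++ [s]).Perm (top.insertIdx (bsearch top s 0 top.length) s) := by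
    rw [hins]
    exact (List.perm_append_singleton s q).trans
      ((hp.cons s).trans (List.perm_orderedInsert (· ≤ ·) s top).symm)
  have hsort1 : (top.insertIdx (bsearch top s 0 top.length) s).Pairwise (· ≤ ·) := by
    rw [hins]; exact List.Pairwise.orderedInsert s top hs
  obtain ⟨h1, t2, heq⟩ := List.exists_cons_of_ne_nil
      (l := top.insertIdx (bsearch top s 0 top.length) s)
      (List.ne_nil_of_length_pos (by rw [← hperm1.length_eq]; simp))
  rw [heq] at hperm1 hsort1
  have hmin1 : (q ++ [s]).min? = some h1 := by
    rw [min?_of_perm _ _ hperm1]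
    exact min?_sorted_cons h1 t2 hsort1
  have hlen : (q ++ [s]).length = (h1 :: t2).length := hperm1.length_eq
  simp only [stepA, stepB, heappushA]
  rw [heq, ← hlen]
  by_cases hk : k < ((q ++ [s]).length : Int)
  · -- pop branch
    have hpop : heappopA (q ++ [s]) = (q ++ [s]).erase h1 := by
      simp [heappopA, hmin1]
    have hperm2 : ((q ++ [s]).erase h1).Perm t2 := by
      have := hperm1.erase h1
      simpa using this
    have hsort2 : t2.Pairwise (· ≤ ·) := hsort1.tail
    simp only [if_pos hk, hpop, List.drop_one, List.tail_cons]
    refine ⟨hperm2, hsort2, ?_⟩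
    rw [min?_of_perm _ _ hperm2]
    cases t2 with
    | nil => simp
    | cons h2 t3 => simp [min?_sorted_cons h2 t3 hsort2]
  · simp only [if_neg hk]
    exact ⟨hperm1, hsort1, by simp [hmin1]⟩

theorem fold_rel (k : Int) (score q top acc : List Int)
    (hp : q.Perm top) (hs : top.Pairwise (· ≤ ·)) :
    (score.foldl (stepA k) (q, acc)).2 = (score.foldl (stepB k) (top, acc)).2 := by
  induction score generalizing q top acc with
  | nil => rfl
  | cons s ss ih =>
    obtain ⟨h1, h2, h3⟩ := step_rel k s q top acc hp hs
    simp only [List.foldl_cons]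
    have : stepA k (q, acc) s = ((stepA k (q, acc) s).1, (stepA k (q, acc) s).2) := rfl
    rw [this, h3]
    have : stepB k (top, acc) s = ((stepB k (top, acc) s).1, (stepB k (top, acc) s).2) := rfl
    rw [this]
    exact ih _ _ _ h1 h2

-- ===== VERDICT (by name: the statement is the Claim_ definition above) =====
theorem solution_spec : Claim_equal_solution := by
  intro k score _ _
  show solution k score = solution_alt k score
  exact fold_rel k score [] [] [] (List.Perm.refl _) List.Pairwise.nil
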